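-- pv_equiv track=rewrite | github.com/duracell04/goni | blueprint/scripts/generate_agents.py | render_truth_map
-- ===== SOURCE A (Python) =====
-- def render_truth_map(truth_map: dict) -> str:
--     groups = {group["id"]: group["title"] for group in truth_map.get("groups", [])}
--     entries_by_group: dict[str, list[dict]] = {group_id: [] for group_id in groups}
--
--     for entry in truth_map.get("entries", []):
--         entries_by_group.setdefault(entry["group"], []).append(entry)
--
--     lines: list[str] = []
--     for group_id, title in groups.items():
--         lines.append(f"### {title}")
--         for entry in entries_by_group.get(group_id, []):
--             lines.append(f"- {entry['id']} - {entry['title']}: `{entry['path']}`")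
--         lines.append("")
--
--     return "\n".join(lines).rstrip() + "\n"
-- ===== SOURCE B (Python) =====
-- def render_truth_map(truth_map: dict) -> str:
--     groups = {g["id"]: g["title"] for g in truth_map.get("groups", [])}
--     entries = truth_map.get("entries", [])
--
--     def block(group_id: str, title: str) -> str:
--         bullets = [f"- {e['id']} - {e['title']}: `{e['path']}`"
--                    for e in entries if e["group"] == group_id]
--         return "\n".join([f"### {title}"] + bullets + [""])
--
--     return "\n".join(block(gid, t) for gid, t in groups.items()).rstrip() + "\n"
-- ===== Notes on version B (the rewrite author's own statement) =====
-- stated objective: alternative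
-- what changed: B drops A's prebuilt entries_by_group index and its flat line accumulator: it renders each group as one self-contained block string (header + comprehension-filtered bullets joined by newlines) and joins the block strings, instead of A's single flat list of lines filled from an index dict.
import Mathlib
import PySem

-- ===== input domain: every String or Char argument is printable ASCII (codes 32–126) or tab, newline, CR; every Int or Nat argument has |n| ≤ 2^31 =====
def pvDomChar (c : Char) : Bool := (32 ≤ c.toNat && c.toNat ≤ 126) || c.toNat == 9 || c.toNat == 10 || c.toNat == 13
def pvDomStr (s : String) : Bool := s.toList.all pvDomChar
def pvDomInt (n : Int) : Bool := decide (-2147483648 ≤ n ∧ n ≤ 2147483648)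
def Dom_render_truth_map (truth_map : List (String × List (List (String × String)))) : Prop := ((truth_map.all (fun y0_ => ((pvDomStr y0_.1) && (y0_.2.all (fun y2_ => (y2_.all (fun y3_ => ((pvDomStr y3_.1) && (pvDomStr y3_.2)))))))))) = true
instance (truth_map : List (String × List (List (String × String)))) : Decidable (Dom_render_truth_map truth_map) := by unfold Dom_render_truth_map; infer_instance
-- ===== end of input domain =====

-- B renders each group as a self-contained block string (filtered comprehension + join) and joins
-- the blocks, instead of A's index dict + flat line accumulator (objective: alternative; same value).


-- shared helpers: Python dicts arrive as association lists; d.get(k, dflt) / d[k] go through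
-- dict(pairs) semantics (last value wins, exact via PySem.Dict.ofList)
def pvLook {ν : Type} (d : List (String × ν)) (k : String) (dflt : ν) : ν :=
  (PySem.Dict.ofList d).getD k dflt

def pvHasKey {ν : Type} (d : List (String × ν)) (k : String) : Bool :=
  (PySem.Dict.ofList d).contains k

-- f"- {entry['id']} - {entry['title']}: `{entry['path']}`"  (identical in both Pythons)
def pvFmt (e : List (String × String)) : String :=
  "- " ++ pvLook e "id" "" ++ " - " ++ pvLook e "title" "" ++ ": `" ++ pvLook e "path" "" ++ "`"

-- {group["id"]: group["title"] for group in truth_map.get("groups", [])}  (identical in both Pythons)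
def pvGroups (truth_map : List (String × List (List (String × String)))) : PySem.Dict String String :=
  (pvLook truth_map "groups" []).foldl
    (fun d g => d.insert (pvLook g "id" "") (pvLook g "title" "")) PySem.Dict.empty

-- ===== PORT A =====
def render_truth_map (truth_map : List (String × List (List (String × String)))) : String :=
  let groups := pvGroups truth_map
  -- entries_by_group = {group_id: [] for group_id in groups}
  let ebg0 : PySem.Dict String (List (List (String × String))) :=
    groups.keys.foldl (fun d k => d.insert k []) PySem.Dict.empty
  -- for entry …: entries_by_group.setdefault(entry["group"], []).append(entry)
  let ebg := (pvLook truth_map "entries" []).foldl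
    (fun d e => d.modify (pvLook e "group" "") [] (· ++ [e])) ebg0
  let lines := groups.items.foldl
    (fun ls p =>
      ((ebg.getD p.1 []).foldl (fun ls2 e => ls2 ++ [pvFmt e]) (ls ++ ["### " ++ p.2])) ++ [""])
    []
  PySem.Str.rstrip (PySem.Str.join "\n" lines) ++ "\n"

-- ===== PORT B =====
-- block(group_id, title): header + comprehension-filtered bullets + "", joined into ONE string
def pvBlock (entries : List (List (String × String))) (group_id title : String) : String :=
  PySem.Str.join "\n"
    (("### " ++ title) ::
      ((entries.filter (fun e => pvLook e "group" "" == group_id)).map pvFmt ++ [""]))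

def render_truth_map_alt (truth_map : List (String × List (List (String × String)))) : String :=
  let entries := pvLook truth_map "entries" []
  PySem.Str.rstrip
    (PySem.Str.join "\n" ((pvGroups truth_map).items.map (fun p => pvBlock entries p.1 p.2)))
    ++ "\n"

-- ===== PRECONDITION & SPEC =====
-- Pre_ excludes exactly the inputs where Python A raises KeyError: a group dict without "id" or
-- "title", an entry without "group", or an entry of a listed group missing "id"/"title"/"path".
def Pre_render_truth_map (truth_map : List (String × List (List (String × String)))) : Prop :=
  (∀ g ∈ pvLook truth_map "groups" [], pvHasKey g "id" ∧ pvHasKey g "title") ∧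
  (∀ e ∈ pvLook truth_map "entries" [],
    pvHasKey e "group" ∧
    (pvLook e "group" "" ∈ (pvLook truth_map "groups" []).map (fun g => pvLook g "id" "") →
      pvHasKey e "id" ∧ pvHasKey e "title" ∧ pvHasKey e "path"))
instance (truth_map : List (String × List (List (String × String)))) : Decidable (Pre_render_truth_map truth_map) := by unfold Pre_render_truth_map; infer_instance

def pvWitness_render_truth_map : (List (String × List (List (String × String)))) :=
  [("groups", [[("id", "g1"), ("title", "Core")]]),
   ("entries", [[("group", "g1"), ("id", "e1"), ("title", "Entry"), ("path", "src/e1.py")]])]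

def Spec_render_truth_map (truth_map : List (String × List (List (String × String)))) (out : String) : Prop := out = render_truth_map_alt truth_map
instance (truth_map : List (String × List (List (String × String)))) (out : String) : Decidable (Spec_render_truth_map truth_map out) := by unfold Spec_render_truth_map; infer_instance

-- ===== CLAIM (what is proved, stated in full; the proofs are below) =====
def Claim_equal_render_truth_map : Prop := ∀ (truth_map : List (String × List (List (String × String)))), Dom_render_truth_map truth_map → Pre_render_truth_map truth_map → Spec_render_truth_map truth_map (render_truth_map truth_map)

-- ===== LEMMAS AND PROOFS =====

-- the initial comprehension {gid: [] for gid in groups} looks up to [] at every key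
theorem getD_foldl_insert_nil {ν : Type} (ks : List String)
    (d : PySem.Dict String (List ν)) (c : String) (h : d.getD c [] = []) :
    (ks.foldl (fun d k => d.insert k ([] : List ν)) d).getD c [] = [] := by
  induction ks generalizing d with
  | nil => exact h
  | cons k ks ih =>
    simp only [List.foldl_cons]
    apply ih
    rw [PySem.Dict.getD_insert]
    split <;> simp [h]

-- A's setdefault/append loop groups: the bucket at c is the filtered entry list, in order
theorem getD_foldl_modify_key {α : Type} [DecidableEq α]
    (key : List (String × String) → α) (es : List (List (String × String)))
    (d : PySem.Dict α (List (List (String × String)))) (c : α) :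
    ((es.foldl (fun d e => d.modify (key e) [] (· ++ [e])) d).getD c []) =
      d.getD c [] ++ es.filter (fun e => key e == c) := by
  induction es generalizing d with
  | nil => simp
  | cons e es ih =>
    simp only [List.foldl_cons, List.filter_cons, ih]
    rw [PySem.Dict.getD_modify]
    by_cases hc : c = key e
    · simp [hc]
    · have hne : (key e == c) = false := by
        simp only [beq_eq_false_iff_ne]
        exact fun h => hc h.symm
      simp [hc, hne]

-- "\n".join over a cons with a nonempty tail peels off one separator
theorem join_cons_ne (sep x : String) (L : List String) (h : L ≠ []) :
    PySem.Str.join sep (x :: L) = x ++ sep ++ PySem.Str.join sep L := by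
  cases L with
  | nil => exact absurd rfl h
  | cons y t =>
    simp only [PySem.Str.join, PySem.Chars.join, List.intercalate, List.map_cons,
      List.intersperse, List.flatten_cons]
    simp [String.append_assoc]

theorem join_singleton' (sep x : String) : PySem.Str.join sep [x] = x := by
  simp [PySem.Str.join, PySem.Chars.join, List.intercalate]

-- joining the flattened blocks = joining the per-block joins (each block nonempty)
theorem join_flatMap {α : Type} (B : α → List String) (hB : ∀ p, B p ≠ [])
    (xs : List α) :
    PySem.Str.join "\n" (xs.flatMap B) =
      PySem.Str.join "\n" (xs.map (fun p => PySem.Str.join "\n" (B p))) := by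
  induction xs with
  | nil => rfl
  | cons x xs ih =>
    cases xs with
    | nil => simp [join_singleton']
    | cons y t =>
      have hflat : (y :: t).flatMap B ≠ [] := by
        simp only [List.flatMap_cons, ne_eq, List.append_eq_nil_iff]
        exact fun ⟨h1, _⟩ => hB y h1
      have hmap : ((y :: t).map (fun p => PySem.Str.join "\n" (B p))) ≠ [] := by simp
      rw [List.flatMap_cons, List.map_cons,
          join_append "\n" (B x) _ (hB x) hflat, ih,
          join_cons_ne "\n" _ _ hmap]
  where
  join_append (sep : String) (L1 L2 : List String) (h1 : L1 ≠ []) (h2 : L2 ≠ []) :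
      PySem.Str.join sep (L1 ++ L2) = PySem.Str.join sep L1 ++ sep ++ PySem.Str.join sep L2 := by
    induction L1 with
    | nil => exact absurd rfl h1
    | cons x t ih =>
      cases t with
      | nil => rw [List.singleton_append, join_cons_ne sep x L2 h2, join_singleton']
      | cons y s =>
        have ht : (y :: s : List String) ≠ [] := by simp
        have hta : (y :: s) ++ L2 ≠ [] := by simp
        rw [List.cons_append, join_cons_ne sep x _ hta, ih ht,
            join_cons_ne sep x _ ht]
        simp [String.append_assoc]

-- ===== VERDICT (by name: the statement is the Claim_ definition above) =====
theorem render_truth_map_spec : Claim_equal_render_truth_map := by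
  intro tm _ _
  show render_truth_map tm = render_truth_map_alt tm
  have hbucket : ∀ (p : String × String),
      (((pvLook tm "entries" []).foldl
          (fun d e => d.modify (pvLook e "group" "") [] (· ++ [e]))
          ((pvGroups tm).keys.foldl (fun d k => d.insert k []) PySem.Dict.empty)).getD p.1 []) =
        (pvLook tm "entries" []).filter (fun e => pvLook e "group" "" == p.1) := by
    intro p
    rw [getD_foldl_modify_key (fun e => pvLook e "group" ""),
        getD_foldl_insert_nil _ _ _ (by simp)]
    simp
  have hlines :
      ((pvGroups tm).items.foldl
        (fun ls p =>
          ((((pvLook tm "entries" []).foldl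
              (fun d e => d.modify (pvLook e "group" "") [] (· ++ [e]))
              ((pvGroups tm).keys.foldl (fun d k => d.insert k []) PySem.Dict.empty)).getD p.1 []).foldl
            (fun ls2 e => ls2 ++ [pvFmt e]) (ls ++ ["### " ++ p.2])) ++ [""])
        []) =
      (pvGroups tm).items.flatMap
        (fun p => ("### " ++ p.2) ::
          (((pvLook tm "entries" []).filter (fun e => pvLook e "group" "" == p.1)).map pvFmt ++ [""])) := by
    have hstep : ∀ (ls : List String) (p : String × String),
        ((((pvLook tm "entries" []).foldl
            (fun d e => d.modify (pvLook e "group" "") [] (· ++ [e]))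
            ((pvGroups tm).keys.foldl (fun d k => d.insert k []) PySem.Dict.empty)).getD p.1 []).foldl
          (fun ls2 e => ls2 ++ [pvFmt e]) (ls ++ ["### " ++ p.2])) ++ [""] =
        ls ++ (("### " ++ p.2) ::
          (((pvLook tm "entries" []).filter (fun e => pvLook e "group" "" == p.1)).map pvFmt ++ [""])) := by
      intro ls p
      rw [hbucket p, PySem.List.foldl_append_singleton_eq_map]
      simp
    calc _ = (pvGroups tm).items.foldl
              (fun ls p => ls ++ (("### " ++ p.2) ::
                (((pvLook tm "entries" []).filter (fun e => pvLook e "group" "" == p.1)).map pvFmt ++ [""])))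
              [] := by
            exact PySem.List.foldl_congr_mem _ _ _ _ (fun ls p _ => hstep ls p)
      _ = _ := by rw [PySem.List.foldl_append_eq_flatMap]; simp
  simp only [render_truth_map, render_truth_map_alt, pvBlock, hlines]
  rw [join_flatMap _ (fun p => by simp)]
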